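-- pv_equiv track=rewrite | github.com/stratosphereips/bsy-clippy | bsy-clippy.py | colorize_response
-- ===== SOURCE A (Python) =====
-- YELLOW = "\033[93m"
--
-- ANSWER_COLOR = "\033[96m"
--
-- RESET = "\033[0m"
--
-- def colorize_response(text):
--     """Return the response string with ANSI colors applied to think segments."""
--     if not text:
--         return ""
--
--     idx = 0
--     in_think = False
--     output = []
--
--     while idx < len(text):
--         if in_think:
--             close_idx = text.find("</think>", idx)
--             if close_idx == -1:
--                 output.append(f"{YELLOW}{text[idx:]}{RESET}")
--                 break
--
--             if close_idx > idx:
--                 output.append(f"{YELLOW}{text[idx:close_idx]}{RESET}")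
--             output.append(f"{YELLOW}</think>{RESET}")
--             idx = close_idx + len("</think>")
--             in_think = False
--         else:
--             open_idx = text.find("<think>", idx)
--             if open_idx == -1:
--                 output.append(f"{ANSWER_COLOR}{text[idx:]}{RESET}")
--                 break
--
--             if open_idx > idx:
--                 output.append(f"{ANSWER_COLOR}{text[idx:open_idx]}{RESET}")
--             output.append(f"{YELLOW}<think>{RESET}")
--             idx = open_idx + len("<think>")
--             in_think = True
--
--     return "".join(output)
-- ===== SOURCE B (Python) =====
-- YELLOW = "\033[93m"
-- ANSWER_COLOR = "\033[96m"
-- RESET = "\033[0m"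
--
-- def colorize_response(text):
--     """Single char-by-char state-machine pass: buffer plain text, flush on a
--     state-matching tag (startswith check at the current position)."""
--     parts = []
--     buf = []
--     i = 0
--     in_think = False
--     while i < len(text):
--         tag = "</think>" if in_think else "<think>"
--         if text.startswith(tag, i):
--             if buf:
--                 parts.append((YELLOW if in_think else ANSWER_COLOR) + "".join(buf) + RESET)
--                 buf = []
--             parts.append(YELLOW + tag + RESET)
--             in_think = not in_think
--             i += len(tag)
--         else:
--             buf.append(text[i])
--             i += 1
--     if buf:
--         parts.append((YELLOW if in_think else ANSWER_COLOR) + "".join(buf) + RESET)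
--     return "".join(parts)
-- ===== Notes on version B (the rewrite author's own statement) =====
-- stated objective: alternative
-- what changed: Replaces A's find()-and-slice jump loop (search for the next state-relevant tag, slice the segment out, append tag and segment separately) by a single character-by-character state machine that buffers plain characters and flushes the buffer when a startswith() check sees the tag matching the current state.
import Mathlib
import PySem

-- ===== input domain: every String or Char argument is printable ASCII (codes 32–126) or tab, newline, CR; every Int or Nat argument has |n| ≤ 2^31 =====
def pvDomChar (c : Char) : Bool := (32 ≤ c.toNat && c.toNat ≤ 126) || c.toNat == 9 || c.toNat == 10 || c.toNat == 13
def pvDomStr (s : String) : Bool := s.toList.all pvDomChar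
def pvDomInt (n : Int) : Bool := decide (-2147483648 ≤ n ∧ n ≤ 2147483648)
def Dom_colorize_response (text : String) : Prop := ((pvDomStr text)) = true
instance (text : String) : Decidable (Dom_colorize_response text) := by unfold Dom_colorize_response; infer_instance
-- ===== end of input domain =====

-- B replaces A's find()-and-slice jump loop by a one-pass character state machine with a
-- buffer flushed at state-matching tags; same output, proved equal on all inputs (objective: alternative).

-- shared module constants (YELLOW / ANSWER_COLOR / RESET and the two tag literals)
def pvYELLOW : List Char := "\x1b[93m".toList
def pvANSWER : List Char := "\x1b[96m".toList
def pvRESET : List Char := "\x1b[0m".toList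
def pvOPEN : List Char := "<think>".toList
def pvCLOSE : List Char := "</think>".toList

-- ===== PORT A =====
-- A's while loop over idx, represented by the remaining suffix s = text[idx:];
-- text.find(tag, idx) is Chars.find on the suffix, the slices are take/drop.
def pvLoopA (s : List Char) (inThink : Bool) : List Char :=
  if hs : s = [] then []            -- while idx < len(text)
  else if inThink then
    let k := PySem.Chars.find s pvCLOSE
    if _hk : k = -1 then pvYELLOW ++ s ++ pvRESET
    else
      (if 0 < k then pvYELLOW ++ s.take k.toNat ++ pvRESET else [])
        ++ (pvYELLOW ++ pvCLOSE ++ pvRESET)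
        ++ pvLoopA (s.drop (k.toNat + 8)) false
  else
    let k := PySem.Chars.find s pvOPEN
    if _hk : k = -1 then pvANSWER ++ s ++ pvRESET
    else
      (if 0 < k then pvANSWER ++ s.take k.toNat ++ pvRESET else [])
        ++ (pvYELLOW ++ pvOPEN ++ pvRESET)
        ++ pvLoopA (s.drop (k.toNat + 7)) true
termination_by s.length
decreasing_by
  · have hpos : 0 < s.length := List.length_pos_iff.2 hs
    simp [List.length_drop]; omega
  · have hpos : 0 < s.length := List.length_pos_iff.2 hs
    simp [List.length_drop]; omega

def colorize_response (text : String) : String :=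
  if text.toList = [] then "" else String.ofList (pvLoopA text.toList false)

-- ===== PORT B =====
def pvTag (b : Bool) : List Char := if b then pvCLOSE else pvOPEN
def pvColor (b : Bool) : List Char := if b then pvYELLOW else pvANSWER

-- B's while loop: s is text[i:]; startswith(tag, i) is a prefix test on the suffix.
def pvScanB (s : List Char) (inThink : Bool) (buf : List Char) : List Char :=
  match s with
  | [] => if buf = [] then [] else pvColor inThink ++ buf ++ pvRESET
  | c :: rest =>
    if PySem.Chars.startswith (c :: rest) (pvTag inThink) then
      (if buf = [] then [] else pvColor inThink ++ buf ++ pvRESET)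
        ++ (pvYELLOW ++ pvTag inThink ++ pvRESET)
        ++ pvScanB ((c :: rest).drop (pvTag inThink).length) (!inThink) []
    else
      pvScanB rest inThink (buf ++ [c])
termination_by s.length
decreasing_by
  · have : 0 < (pvTag inThink).length := by cases inThink <;> decide
    simp [List.length_drop]; omega
  · simp

def colorize_response_alt (text : String) : String :=
  String.ofList (pvScanB text.toList false [])

-- ===== PRECONDITION & SPEC =====
def Spec_colorize_response (text : String) (out : String) : Prop := out = colorize_response_alt text
instance (text : String) (out : String) : Decidable (Spec_colorize_response text out) := by unfold Spec_colorize_response; infer_instance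

-- ===== CLAIM (what is proved, stated in full; the proofs are below) =====
def Claim_equal_colorize_response : Prop := ∀ (text : String), Dom_colorize_response text → Spec_colorize_response text (colorize_response text)

-- ===== LEMMAS AND PROOFS =====

-- find points at k when sub is a prefix there and nowhere earlier (uniqueness from Chars.find_spec)
lemma pv_find_eq {s sub : List Char} {k : Nat} (h1 : sub <+: s.drop k)
    (h2 : ∀ i < k, ¬ sub <+: s.drop i) : PySem.Chars.find s sub = (k : Int) := by
  have hin : sub <:+: s := h1.isInfix.trans (s.drop_suffix k).isInfix
  have hnn : 0 ≤ PySem.Chars.find s sub := (PySem.Chars.find_nonneg_iff s sub).2 hin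
  obtain ⟨hp, hmin⟩ := PySem.Chars.find_spec hnn
  have : (PySem.Chars.find s sub).toNat = k := by
    rcases Nat.lt_trichotomy (PySem.Chars.find s sub).toNat k with h | h | h
    · exact absurd hp (h2 _ h)
    · exact h
    · exact absurd h1 (hmin _ h)
  omega

lemma pv_find_cons {c : Char} {rest sub : List Char} (h : ¬ sub <+: (c :: rest)) :
    PySem.Chars.find (c :: rest) sub =
      (if PySem.Chars.find rest sub = -1 then -1 else PySem.Chars.find rest sub + 1) := by
  by_cases hf : PySem.Chars.find rest sub = -1
  · have hni : ¬ sub <:+: rest := (PySem.Chars.find_eq_neg_one_iff rest sub).1 hf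
    have : ¬ sub <:+: (c :: rest) := by
      intro hi
      rcases List.infix_cons_iff.1 hi with hp | hi'
      · exact h hp
      · exact hni hi'
    simp [hf, (PySem.Chars.find_eq_neg_one_iff _ sub).2 this]
  · have hnn : 0 ≤ PySem.Chars.find rest sub := by
      have := PySem.Chars.neg_one_le_find rest sub; omega
    obtain ⟨hp, hmin⟩ := PySem.Chars.find_spec hnn
    have hk : PySem.Chars.find (c :: rest) sub = ((PySem.Chars.find rest sub).toNat + 1 : Nat) := by
      apply pv_find_eq
      · simpa using hp
      · intro i hi
        match i with
        | 0 => simpa using h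
        | j + 1 => exact fun hpj => hmin j (by omega) (by simpa using hpj)
    rw [hk]; simp [hf]; omega

-- one "jump" of B's scan: it consumes everything up to the first state-matching tag
lemma pv_scan_unfold : ∀ (n : Nat) (s : List Char), s.length ≤ n → ∀ (b : Bool) (buf : List Char),
    pvScanB s b buf =
      if PySem.Chars.find s (pvTag b) = -1 then
        (if buf ++ s = [] then [] else pvColor b ++ (buf ++ s) ++ pvRESET)
      else
        (if buf ++ s.take (PySem.Chars.find s (pvTag b)).toNat = [] then []
         else pvColor b ++ (buf ++ s.take (PySem.Chars.find s (pvTag b)).toNat) ++ pvRESET)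
          ++ (pvYELLOW ++ pvTag b ++ pvRESET)
          ++ pvScanB (s.drop ((PySem.Chars.find s (pvTag b)).toNat + (pvTag b).length)) (!b) [] := by
  intro n
  induction n with
  | zero =>
    intro s hs b buf
    have : s = [] := List.length_eq_zero_iff.1 (Nat.le_zero.1 hs)
    subst this
    have : PySem.Chars.find [] (pvTag b) = -1 := by cases b <;> decide
    simp [pvScanB, this]
  | succ n ih =>
    intro s hs b buf
    match s with
    | [] =>
      have : PySem.Chars.find [] (pvTag b) = -1 := by cases b <;> decide
      simp [pvScanB, this]
    | c :: rest =>
      by_cases hp : pvTag b <+: (c :: rest)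
      · have hf : PySem.Chars.find (c :: rest) (pvTag b) = (0 : Int) :=
          pv_find_eq (k := 0) (by simpa using hp) (by omega)
        have hsw : PySem.Chars.startswith (c :: rest) (pvTag b) = true :=
          (PySem.Chars.startswith_iff _ _).2 hp
        rw [pvScanB, hsw]
        simp [hf]
      · have hsw : PySem.Chars.startswith (c :: rest) (pvTag b) = false := by
          rw [Bool.eq_false_iff]
          intro h
          exact hp ((PySem.Chars.startswith_iff _ _).1 h)
        rw [pvScanB]
        rw [hsw]
        simp only [if_false, Bool.false_eq_true]
        rw [ih rest (by simpa using Nat.succ_le_succ_iff.1 hs) b (buf ++ [c])]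
        rw [pv_find_cons hp]
        by_cases hf : PySem.Chars.find rest (pvTag b) = -1
        · simp [hf]
        · have hnn : 0 ≤ PySem.Chars.find rest (pvTag b) := by
            have := PySem.Chars.neg_one_le_find rest (pvTag b); omega
          have htn : (PySem.Chars.find rest (pvTag b) + 1).toNat
              = (PySem.Chars.find rest (pvTag b)).toNat + 1 := by omega
          simp only [hf, if_false, htn]
          rw [if_neg (by omega : ¬PySem.Chars.find rest (pvTag b) + 1 = -1)]
          have hd : (PySem.Chars.find rest (pvTag b)).toNat + 1 + (pvTag b).length
              = ((PySem.Chars.find rest (pvTag b)).toNat + (pvTag b).length) + 1 := by omega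
          rw [hd]
          simp [List.take_succ_cons, List.drop_succ_cons]

-- A's jump loop equals B's scan started with an empty buffer
lemma pv_loop_eq_scan : ∀ (n : Nat) (s : List Char), s.length ≤ n → ∀ (b : Bool),
    pvLoopA s b = pvScanB s b [] := by
  intro n
  induction n with
  | zero =>
    intro s hs b
    have : s = [] := List.length_eq_zero_iff.1 (Nat.le_zero.1 hs)
    subst this
    simp [pvLoopA, pvScanB]
  | succ n ih =>
    intro s hs b
    match s with
    | [] => simp [pvLoopA, pvScanB]
    | c :: rest =>
      rw [pv_scan_unfold (n + 1) (c :: rest) hs b []]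
      rw [pvLoopA]
      rw [dif_neg (by simp : ¬(c :: rest) = [])]
      cases b with
      | true =>
        simp only [if_true, pvTag, pvColor, List.nil_append, Bool.not_true]
        by_cases hk : PySem.Chars.find (c :: rest) pvCLOSE = -1
        · simp [hk]
        · have hnn : 0 ≤ PySem.Chars.find (c :: rest) pvCLOSE := by
            have := PySem.Chars.neg_one_le_find (c :: rest) pvCLOSE; omega
          have hlen : pvCLOSE.length = 8 := by decide
          have hrec : pvLoopA ((c :: rest).drop ((PySem.Chars.find (c :: rest) pvCLOSE).toNat + 8)) false
              = pvScanB ((c :: rest).drop ((PySem.Chars.find (c :: rest) pvCLOSE).toNat + 8)) false [] := by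
            apply ih
            simp only [List.length_drop, List.length_cons] at hs ⊢
            omega
          rw [hlen, hrec]
          by_cases h0 : (0 : Int) < PySem.Chars.find (c :: rest) pvCLOSE
          · have htne : List.take (PySem.Chars.find (c :: rest) pvCLOSE).toNat (c :: rest) ≠ [] := by
              simp [List.take_eq_nil_iff]; omega
            simp [hk, h0, htne]
          · have h00 : PySem.Chars.find (c :: rest) pvCLOSE = 0 := by omega
            simp [h00]
      | false =>
        simp only [Bool.false_eq_true, if_false, pvTag, pvColor, List.nil_append, Bool.not_false]
        by_cases hk : PySem.Chars.find (c :: rest) pvOPEN = -1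
        · simp [hk]
        · have hnn : 0 ≤ PySem.Chars.find (c :: rest) pvOPEN := by
            have := PySem.Chars.neg_one_le_find (c :: rest) pvOPEN; omega
          have hlen : pvOPEN.length = 7 := by decide
          have hrec : pvLoopA ((c :: rest).drop ((PySem.Chars.find (c :: rest) pvOPEN).toNat + 7)) true
              = pvScanB ((c :: rest).drop ((PySem.Chars.find (c :: rest) pvOPEN).toNat + 7)) true [] := by
            apply ih
            simp only [List.length_drop, List.length_cons] at hs ⊢
            omega
          rw [hlen, hrec]
          by_cases h0 : (0 : Int) < PySem.Chars.find (c :: rest) pvOPEN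
          · have htne : List.take (PySem.Chars.find (c :: rest) pvOPEN).toNat (c :: rest) ≠ [] := by
              simp [List.take_eq_nil_iff]; omega
            simp [hk, h0, htne]
          · have h00 : PySem.Chars.find (c :: rest) pvOPEN = 0 := by omega
            simp [h00]

-- ===== VERDICT (by name: the statement is the Claim_ definition above) =====
theorem colorize_response_spec : Claim_equal_colorize_response := by
  intro text _
  unfold Spec_colorize_response colorize_response colorize_response_alt
  by_cases h : text.toList = []
  · simp [h, pvScanB]
  · rw [if_neg h, pv_loop_eq_scan text.toList.length text.toList le_rfl false]
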